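-- pv_equiv track=rewrite | github.com/seanie5011/PySimpleGUI_RandomApps | VideoDownloader.py | string_skipper
-- ===== SOURCE A (Python) =====
-- def string_skipper(text, max_length):
--     '''
--     Takes in a string and seperates it by linebreak into 'word's
--     Adds a new linebreak on any 'word' if it is > max_length
--     Returns new string after recombining
--     '''
--
--     words = text.split('\n')
--     words = [word + '\n' for word in words]  # split removes the \n so put em back
--
--     new_words = []
--     for word in words:
--         end_new_word = word
--         # make sure this part of the word is below threshold, if not, cut and append to new words
--         while len(end_new_word) > max_length:
--             start_new_word = end_new_word[:max_length] + "\n"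
--             end_new_word = end_new_word[max_length:]
--
--             new_words.append(start_new_word)
--
--         new_words.append(end_new_word)
--
--     new_text = ''.join(new_words)[:-1]  # turn list into a string, remove last two letters as we have accidentally added an extra "\n"
--
--     return new_text
-- ===== SOURCE B (Python) =====
-- def string_skipper(text, max_length):
--     # Single character-level pass: column counter + output buffer.
--     # The line-terminating newline counts toward the width (as in A),
--     # and the newline-reset takes priority over the width break.
--     buf = []
--     col = 0
--     for c in text + '\n':
--         buf.append(c)
--         col += 1
--         if c == '\n':
--             col = 0
--         elif col == max_length:
--             buf.append('\n')
--             col = 0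
--     return ''.join(buf)[:-1]
-- ===== Notes on version B (the rewrite author's own statement) =====
-- stated objective: simpler
-- what changed: Replaced split-into-words plus nested while-chunking (with intermediate word lists and a join) by a single character-level pass over text+' ' that keeps a column counter, resetting on newline and inserting a break when the counter reaches max_length.
import Mathlib
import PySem

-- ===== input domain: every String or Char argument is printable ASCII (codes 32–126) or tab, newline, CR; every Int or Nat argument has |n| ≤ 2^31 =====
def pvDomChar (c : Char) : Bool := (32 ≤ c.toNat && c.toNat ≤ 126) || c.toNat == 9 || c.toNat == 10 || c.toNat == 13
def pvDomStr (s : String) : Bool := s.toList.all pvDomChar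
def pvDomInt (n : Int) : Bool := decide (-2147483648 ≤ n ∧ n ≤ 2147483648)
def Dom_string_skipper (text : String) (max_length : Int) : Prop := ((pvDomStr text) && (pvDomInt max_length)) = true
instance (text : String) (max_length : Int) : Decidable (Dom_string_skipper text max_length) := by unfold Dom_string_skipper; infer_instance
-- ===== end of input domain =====

-- B replaces A's split-then-chunk nested loops by a single character-level pass with a
-- column counter (objective: simpler, one pass, no intermediate word lists).

-- ===== PORT A =====
-- the `while len(end_new_word) > max_length` loop; fuel = initial length of end_new_word
-- (each iteration removes ≥ 1 char when max_length ≥ 1, so that fuel suffices on Pre_).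
def skWhile (m : Int) : Nat → List Char → List (List Char) → List (List Char)
  | 0, endw, acc => acc ++ [endw]
  | fuel + 1, endw, acc =>
    if (endw.length : Int) > m then
      skWhile m fuel (PySem.List.slice endw (some m) none)
        (acc ++ [PySem.List.slice endw none (some m) ++ ['\n']])
    else acc ++ [endw]

def string_skipper (text : String) (max_length : Int) : String :=
  let words := PySem.Chars.splitOn text.toList ['\n']
  let words := words.map (fun word => word ++ ['\n'])
  let new_words := words.foldl (fun acc word => skWhile max_length word.length word acc) []
  String.ofList (PySem.List.slice (PySem.Chars.join [] new_words) none (some (-1)))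

-- ===== PORT B =====
-- one step of B's for-loop: append the char, bump the column; '\n' resets, hitting the
-- width inserts a break.
def skStep (m : Int) (st : List Char × Int) (c : Char) : List Char × Int :=
  let buf := st.1 ++ [c]
  let col := st.2 + 1
  if c = '\n' then (buf, 0)
  else if col = m then (buf ++ ['\n'], 0)
  else (buf, col)

def string_skipper_alt (text : String) (max_length : Int) : String :=
  let st := (text.toList ++ ['\n']).foldl (skStep max_length) ([], 0)
  String.ofList (PySem.List.slice st.1 none (some (-1)))

-- ===== PRECONDITION & SPEC =====
-- Pre_ excludes max_length ≤ 0, on which A's while loop never terminates (A never returns there).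
def Pre_string_skipper (text : String) (max_length : Int) : Prop := 1 ≤ max_length
instance (text : String) (max_length : Int) : Decidable (Pre_string_skipper text max_length) := by
  unfold Pre_string_skipper; infer_instance

def pvWitness_string_skipper : String × Int := ("hello\nworld", 4)

def Spec_string_skipper (text : String) (max_length : Int) (out : String) : Prop :=
  out = string_skipper_alt text max_length
instance (text : String) (max_length : Int) (out : String) : Decidable (Spec_string_skipper text max_length out) := by
  unfold Spec_string_skipper; infer_instance

-- ===== CLAIM (what is proved, stated in full; the proofs are below) =====
def Claim_equal_string_skipper : Prop := ∀ (text : String) (max_length : Int),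
  Dom_string_skipper text max_length → Pre_string_skipper text max_length →
  Spec_string_skipper text max_length (string_skipper text max_length)

-- ===== LEMMAS AND PROOFS =====

-- simple recursive specification of str.split('\n') on the character list
def sp : List Char → List (List Char)
  | [] => [[]]
  | c :: cs => if c = '\n' then [] :: sp cs else List.modifyHead (fun w => c :: w) (sp cs)

theorem sp_ne_nil (cs : List Char) : sp cs ≠ [] := by
  induction cs with
  | nil => simp [sp]
  | cons c cs ih =>
    simp only [sp]
    split_ifs <;> simp_all [List.modifyHead]
    cases h : sp cs <;> simp_all

theorem sp_no_newline (cs : List Char) : ∀ w ∈ sp cs, '\n' ∉ w := by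
  induction cs with
  | nil => simp [sp]
  | cons c cs ih =>
    simp only [sp]
    split_ifs with hc
    · intro w hw
      rcases List.mem_cons.mp hw with h | h
      · simp [h]
      · exact ih w h
    · rcases List.exists_cons_of_ne_nil (sp_ne_nil cs) with ⟨w, ws, h⟩
      rw [h]
      simp only [List.modifyHead]
      intro v hv
      rcases List.mem_cons.mp hv with h' | h'
      · subst h'
        intro hmem
        rcases List.mem_cons.mp hmem with h'' | h''
        · exact hc h''.symm
        · exact ih w (h ▸ List.mem_cons_self ..) h''
      · exact ih v (h ▸ List.mem_cons_of_mem _ h')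

theorem sp_flatten (cs : List Char) :
    ((sp cs).map (fun w => w ++ ['\n'])).flatten = cs ++ ['\n'] := by
  induction cs with
  | nil => simp [sp]
  | cons c cs ih =>
    simp only [sp]
    split_ifs with hc
    · subst hc; simp [ih]
    · cases h : sp cs with
      | nil => exact absurd h (sp_ne_nil cs)
      | cons w ws => rw [h] at ih; simpa [List.modifyHead] using congrArg (c :: ·) ih

-- splitOn.go with enough fuel computes sp (single-char separator '\n')
theorem splitOn_go_eq : ∀ (fuel : Nat) (l cur : List Char) (acc : List (List Char)),
    l.length < fuel →
    PySem.Chars.splitOn.go ['\n'] fuel l cur acc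
      = acc.reverse ++ List.modifyHead (fun w => cur.reverse ++ w) (sp l) := by
  intro fuel
  induction fuel with
  | zero => intro l cur acc h; omega
  | succ fuel ih =>
    intro l cur acc h
    cases l with
    | nil => simp [PySem.Chars.splitOn.go, sp]
    | cons c rest =>
      simp only [PySem.Chars.splitOn.go]
      by_cases hc : c = '\n'
      · subst hc
        have hpre : List.isPrefixOf ['\n'] ('\n' :: rest) = true := by
          simp [List.isPrefixOf]
        rw [if_pos hpre]
        rw [ih _ _ _ (by simpa using Nat.lt_of_succ_lt_succ h)]
        simp only [sp, List.modifyHead, List.reverse_cons, List.reverse_nil,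
          List.nil_append, List.append_assoc]
        rcases h' : sp rest with _ | ⟨a, l⟩ <;> simp [h']
      · have hpre : List.isPrefixOf ['\n'] (c :: rest) = false := by
          simp [List.isPrefixOf]; exact fun h' => hc h'.symm
        rw [if_neg (by simp [hpre])]
        rw [ih _ _ _ (by simpa using Nat.lt_of_succ_lt_succ h)]
        simp only [sp, if_neg hc]
        cases h' : sp rest with
        | nil => exact absurd h' (sp_ne_nil rest)
        | cons w ws => simp [List.modifyHead]

theorem splitOn_eq_sp (cs : List Char) : PySem.Chars.splitOn cs ['\n'] = sp cs := by
  unfold PySem.Chars.splitOn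
  rw [splitOn_go_eq (cs.length + 1) cs [] [] (by omega)]
  cases sp cs <;> simp [List.modifyHead]

-- the while-loop accumulator extracts
theorem skWhile_acc (m : Int) : ∀ (fuel : Nat) (endw : List Char) (acc : List (List Char)),
    skWhile m fuel endw acc = acc ++ skWhile m fuel endw [] := by
  intro fuel
  induction fuel with
  | zero => intro endw acc; simp [skWhile]
  | succ fuel ih =>
    intro endw acc
    simp only [skWhile]
    split_ifs with h
    · rw [ih _ (acc ++ _), ih _ ([] ++ _)]; simp
    · simp

-- the word-loop accumulator extracts as well
theorem skWhile_foldl_acc (m : Int) : ∀ (ws acc : List (List Char)),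
    ws.foldl (fun acc word => skWhile m word.length word acc) acc
      = acc ++ ws.foldl (fun acc word => skWhile m word.length word acc) [] := by
  intro ws
  induction ws with
  | nil => intro acc; simp
  | cons v vs ihv =>
    intro acc
    simp only [List.foldl_cons]
    rw [skWhile_acc, ihv, ihv (skWhile m v.length v [])]
    simp

-- ''.join on char lists: interspersing the empty separator does not change the flattening
theorem intersperse_nil_flatten : ∀ (xs : List (List Char)),
    (List.intersperse ([] : List Char) xs).flatten = xs.flatten := by
  intro xs
  induction xs with
  | nil => simp
  | cons a t ih =>
    cases t with
    | nil => simp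
    | cons b t' =>
      rw [show List.intersperse ([]:List Char) (a :: b :: t')
            = a :: [] :: List.intersperse [] (b :: t') from by simp [List.intersperse]]
      simp only [List.flatten_cons] at *
      simp [ih]

-- B's loop over chars that neither are '\n' nor reach the width just copies them
theorem skStep_noFire (m : Int) : ∀ (v : List Char) (buf : List Char) (col : Int),
    '\n' ∉ v → col + v.length < m →
    v.foldl (skStep m) (buf, col) = (buf ++ v, col + v.length) := by
  intro v
  induction v with
  | nil => intro buf col _ _; simp
  | cons c v ih =>
    intro buf col hnl hlt
    simp only [List.length_cons, Nat.cast_add, Nat.cast_one] at hlt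
    simp only [List.foldl_cons]
    have hc : c ≠ '\n' := fun h => hnl (h ▸ List.mem_cons_self ..)
    have hv0 : (0:Int) ≤ (v.length : Int) := Int.natCast_nonneg _
    have hne : col + 1 ≠ m := by omega
    rw [show skStep m (buf, col) c = (buf ++ [c], col + 1) by
      simp [skStep, hc, hne]]
    rw [ih _ _ (fun h => hnl (List.mem_cons_of_mem _ h)) (by omega)]
    simp only [List.length_cons, Nat.cast_add, Nat.cast_one, Prod.mk.injEq]
    exact ⟨by simp, by ring⟩

-- B's loop fires the width break exactly when the column reaches m
theorem skStep_fire (m : Int) : ∀ (v : List Char) (buf : List Char) (col : Int),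
    '\n' ∉ v → col + v.length = m → 1 ≤ v.length →
    v.foldl (skStep m) (buf, col) = (buf ++ v ++ ['\n'], 0) := by
  intro v
  induction v with
  | nil => intro _ _ _ _ h; simp at h
  | cons c v ih =>
    intro buf col hnl heq _
    have hc : c ≠ '\n' := fun h => hnl (h ▸ List.mem_cons_self ..)
    simp only [List.foldl_cons]
    cases v with
    | nil =>
      have : col + 1 = m := by simpa using heq
      simp [skStep, hc, this]
    | cons d v' =>
      have hne : col + 1 ≠ m := by
        simp only [List.length_cons] at heq; push_cast at heq
        have : (0:Int) ≤ v'.length := by positivity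
        omega
      rw [show skStep m (buf, col) c = (buf ++ [c], col + 1) by simp [skStep, hc, hne]]
      rw [ih _ _ (fun h => hnl (List.mem_cons_of_mem _ h))
        (by simp only [List.length_cons] at heq ⊢; push_cast at heq ⊢; omega) (by simp)]
      simp

theorem skStep_newline (m : Int) (buf : List Char) (col : Int) :
    skStep m (buf, col) '\n' = (buf ++ ['\n'], 0) := by simp [skStep]

-- per word: B's pass over u ++ ['\n'] produces exactly the chunks A's while loop emits
theorem word_eq (m : Int) (hm : 1 ≤ m) :
    ∀ (fuel : Nat) (u : List Char) (buf : List Char), '\n' ∉ u → u.length + 1 ≤ fuel →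
    (u ++ ['\n']).foldl (skStep m) (buf, 0)
      = (buf ++ (skWhile m fuel (u ++ ['\n']) []).flatten, 0) := by
  intro fuel
  induction fuel with
  | zero => intro u buf _ h; omega
  | succ fuel ih =>
    intro u buf hnl hfuel
    simp only [skWhile]
    by_cases hlen : ((u ++ ['\n']).length : Int) > m
    · rw [if_pos hlen]
      have hm0 : (0:Int) ≤ m := by omega
      have hmu : m.toNat ≤ u.length := by
        simp only [List.length_append, List.length_cons, List.length_nil] at hlen
        omega
      rw [PySem.List.slice_to _ hm0, PySem.List.slice_from _ hm0]
      have htake : (u ++ ['\n']).take m.toNat = u.take m.toNat :=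
        List.take_append_of_le_length hmu
      have hdrop : (u ++ ['\n']).drop m.toNat = u.drop m.toNat ++ ['\n'] :=
        List.drop_append_of_le_length hmu
      rw [htake, hdrop, skWhile_acc]
      -- split B's traversal of u ++ ['\n'] at position m.toNat
      have hsplit : u ++ ['\n'] = u.take m.toNat ++ (u.drop m.toNat ++ ['\n']) := by
        rw [← List.append_assoc, List.take_append_drop]
      rw [hsplit, List.foldl_append]
      rw [skStep_fire m (u.take m.toNat) buf 0
        (fun h => hnl (List.mem_of_mem_take h))
        (by simp [List.length_take, Nat.min_eq_left hmu]; omega)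
        (by simp [List.length_take]; omega)]
      rw [ih (u.drop m.toNat) _ (fun h => hnl (List.mem_of_mem_drop h))
        (by simp [List.length_drop]; omega)]
      simp
    · rw [if_neg hlen]
      rw [show u ++ ['\n'] = u ++ ['\n'] from rfl, List.foldl_append]
      rw [skStep_noFire m u buf 0 hnl
        (by simp only [List.length_append, List.length_cons, List.length_nil] at hlen
            push_cast at hlen ⊢; omega)]
      simp [skStep_newline]

-- over the whole word list
theorem text_eq (m : Int) (hm : 1 ≤ m) :
    ∀ (ws : List (List Char)) (buf : List Char),
    (∀ w ∈ ws, '\n' ∉ w) →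
    ((ws.map (fun w => w ++ ['\n'])).flatten).foldl (skStep m) (buf, 0)
      = (buf ++ ((ws.map (fun w => w ++ ['\n'])).foldl
          (fun acc word => skWhile m word.length word acc) []).flatten, 0) := by
  intro ws
  induction ws with
  | nil => intro buf _; simp
  | cons w ws ih =>
    intro buf hnl
    simp only [List.map_cons, List.flatten_cons, List.foldl_cons]
    rw [List.foldl_append,
      word_eq m hm (w ++ ['\n']).length w buf (hnl w (List.mem_cons_self ..)) (by simp)]
    rw [ih _ (fun v hv => hnl v (List.mem_cons_of_mem _ hv))]
    rw [skWhile_foldl_acc m _ (skWhile m (w ++ ['\n']).length (w ++ ['\n']) [])]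
    simp

-- ===== VERDICT (by name: the statement is the Claim_ definition above) =====
theorem string_skipper_spec : Claim_equal_string_skipper := by
  intro text m _ hpre
  unfold Spec_string_skipper string_skipper string_skipper_alt
  have hm : 1 ≤ m := hpre
  rw [splitOn_eq_sp]
  have hflat := sp_flatten text.toList
  have := text_eq m hm (sp text.toList) [] (sp_no_newline text.toList)
  rw [hflat] at this
  rw [this]
  simp only [PySem.Chars.join, List.intercalate, intersperse_nil_flatten, List.nil_append]
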